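-- pv_equiv track=rewrite | github.com/J-Wiseman-MU/daytrader_ai | buySellClassifier.py | find_best_actions
-- ===== SOURCE A (Python) =====
-- def find_best_actions(prices):
--     actions = [2] * 390
--     max_profit = 0
--     min_price = float('inf')
--     buy_minute = 0
--
--     for i in range(len(prices)):
--         if prices[i] < min_price:
--             min_price = prices[i]
--             buy_minute = i
--
--         potential_profit = prices[i] - min_price
--
--         if potential_profit > max_profit:
--             max_profit = potential_profit
--             actions[buy_minute] = 0
--             actions[i] = 1
--             # Reset min_price and buy_minute for the next buy opportunity
--             min_price = float('inf')
--             buy_minute = 0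
--             max_profit = 0
--
--     return actions
-- ===== SOURCE B (Python) =====
-- def find_best_actions(prices):
--     actions = [2] * 390
--     n = len(prices)
--     j = 1
--     s = 0
--     while j < n:
--         if prices[j] > prices[j - 1]:
--             # adjacent ascent: the stretch since s is non-increasing, so its
--             # minimum is prices[j-1]; the buy mark is the start of the trailing
--             # plateau of that value
--             k = j - 1
--             while k > s and prices[k - 1] == prices[j - 1]:
--                 k -= 1
--             actions[k] = 0
--             actions[j] = 1
--             s = j + 1
--             j += 2
--         else:
--             j += 1
--     return actions
-- ===== Notes on version B (the rewrite author's own statement) =====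
-- stated objective: alternative
-- what changed: B drops A's running-minimum/max-profit state entirely: it detects a sell at the first adjacent ascent prices[j] > prices[j-1] (correct because the stretch since the last sell is necessarily non-increasing, so its minimum is prices[j-1]) and finds the buy mark by walking back through the trailing plateau of equal values; Pre_ excludes lists longer than 390, where a buy/sell mark at index >= 390 makes A raise IndexError (on rise-free long lists both A and B still return the all-2 array).
import Mathlib
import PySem

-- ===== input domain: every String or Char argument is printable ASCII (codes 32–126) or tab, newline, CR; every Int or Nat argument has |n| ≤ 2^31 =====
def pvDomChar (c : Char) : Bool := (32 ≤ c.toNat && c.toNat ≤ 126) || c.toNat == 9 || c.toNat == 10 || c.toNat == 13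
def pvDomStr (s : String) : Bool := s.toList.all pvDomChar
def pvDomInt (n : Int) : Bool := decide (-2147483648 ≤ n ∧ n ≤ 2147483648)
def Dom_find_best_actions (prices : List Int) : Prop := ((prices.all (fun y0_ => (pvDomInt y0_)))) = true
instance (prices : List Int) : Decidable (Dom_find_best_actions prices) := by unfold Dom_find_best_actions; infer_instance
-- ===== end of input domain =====

-- B replaces A's running-minimum/max-profit greedy with adjacent-ascent detection
-- plus a backward plateau walk for the buy mark; objective: alternative.

-- ===== PORT A =====
-- loop body of A's single for-loop; state = (actions, max_profit, min_price, buy_minute),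
-- min_price = none encodes Python's float('inf')
def pvStepA (prices : List Int) (st : List Int × Int × Option Int × Nat) (i : Nat) :
    List Int × Int × Option Int × Nat :=
  let p := prices.getD i 0
  -- if prices[i] < min_price: min_price, buy_minute := prices[i], i
  let mb : Option Int × Nat :=
    match st.2.2.1 with
    | none => (some p, i)
    | some v => if p < v then (some p, i) else (some v, st.2.2.2)
  -- potential_profit = prices[i] - min_price  (min_price is finite here, as in Python)
  let pp : Int := match mb.1 with | some v => p - v | none => 0
  if pp > st.2.1 then
    ((st.1.set mb.2 (0:Int)).set i (1:Int), (0:Int), (none : Option Int), (0:Nat))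
  else
    (st.1, st.2.1, mb.1, mb.2)

def find_best_actions (prices : List Int) : List Int :=
  ((List.range prices.length).foldl (pvStepA prices)
    (List.replicate 390 (2:Int), (0:Int), (none : Option Int), (0:Nat))).1

-- ===== PORT B =====
-- inner while-loop of Source B: walk k back through the trailing plateau of value v;
-- fuel only makes the loop structural; fuel = k always suffices since k decreases.
def pvPlat (prices : List Int) (s : Nat) (v : Int) : Nat → Nat → Nat
  | 0, k => k
  | fuel + 1, k =>
    if s < k ∧ prices[k - 1]?.getD 0 = v then pvPlat prices s v fuel (k - 1) else k

-- outer while-loop of Source B: j scans for adjacent ascents prices[j] > prices[j-1];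
-- fuel = n suffices since j strictly increases each iteration.
def pvScan (prices : List Int) (n : Nat) : Nat → List Int → Nat → Nat → List Int
  | 0, a, _, _ => a
  | fuel + 1, a, s, j =>
    if j < n then
      if prices[j - 1]?.getD 0 < prices[j]?.getD 0 then
        let k := pvPlat prices s (prices[j - 1]?.getD 0) (j - 1) (j - 1)
        pvScan prices n fuel ((a.set k (0:Int)).set j (1:Int)) (j + 1) (j + 2)
      else pvScan prices n fuel a s (j + 1)
    else a

def find_best_actions_alt (prices : List Int) : List Int :=
  pvScan prices prices.length prices.length (List.replicate 390 (2:Int)) 0 1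

-- ===== PRECONDITION & SPEC =====
-- Pre_ excludes lists longer than 390: A marks buys/sells in a fixed 390-slot actions
-- array, so a profitable rise at an index ≥ 390 makes A raise IndexError; whether A
-- returns on such long lists depends on the price pattern, so they are all excluded.
def Pre_find_best_actions (prices : List Int) : Prop := prices.length ≤ 390
instance (prices : List Int) : Decidable (Pre_find_best_actions prices) := by
  unfold Pre_find_best_actions; infer_instance
def pvWitness_find_best_actions : List Int := [3, 1, 4, 2]
def Spec_find_best_actions (prices : List Int) (out : List Int) : Prop := out = find_best_actions_alt prices
instance (prices : List Int) (out : List Int) : Decidable (Spec_find_best_actions prices out) := by unfold Spec_find_best_actions; infer_instance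

-- ===== CLAIM (what is proved, stated in full; the proofs are below) =====
def Claim_equal_find_best_actions : Prop := ∀ (prices : List Int), Dom_find_best_actions prices → Pre_find_best_actions prices → Spec_find_best_actions prices (find_best_actions prices)

-- ===== LEMMAS AND PROOFS =====

-- canonical-fuel forms
def pvPl (prices : List Int) (s : Nat) (v : Int) (k : Nat) : Nat :=
  pvPlat prices s v k k

def pvScanC (prices : List Int) (a : List Int) (s j : Nat) : List Int :=
  pvScan prices prices.length (prices.length - j) a s j

lemma pvPl_stop (prices : List Int) (s : Nat) (v : Int) (k : Nat)
    (h : ¬ (s < k ∧ prices[k - 1]?.getD 0 = v)) : pvPl prices s v k = k := by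
  unfold pvPl
  cases k with
  | zero => rfl
  | succ m => rw [pvPlat, if_neg h]

lemma pvPl_step (prices : List Int) (s : Nat) (v : Int) (k : Nat)
    (h1 : s < k) (h2 : prices[k - 1]?.getD 0 = v) :
    pvPl prices s v k = pvPl prices s v (k - 1) := by
  unfold pvPl
  cases k with
  | zero => omega
  | succ m =>
    rw [pvPlat]
    simp only [if_pos (And.intro h1 h2)]
    rfl

-- pvScan's result does not depend on the fuel, once sufficient
lemma pvScan_fuel (prices : List Int) (n : Nat) :
    ∀ (f1 : Nat) (a : List Int) (s j : Nat) (f2 : Nat), n - j ≤ f1 → n - j ≤ f2 →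
      pvScan prices n f1 a s j = pvScan prices n f2 a s j := by
  intro f1
  induction f1 with
  | zero =>
    intro a s j f2 h1 h2
    have hj : ¬ j < n := by omega
    cases f2 with
    | zero => rfl
    | succ f2 => rw [pvScan, pvScan]; simp [hj]
  | succ f1 ih =>
    intro a s j f2 h1 h2
    by_cases hj : j < n
    · cases f2 with
      | zero => omega
      | succ f2 =>
        rw [pvScan, pvScan]
        simp only [if_pos hj]
        by_cases ha : prices[j - 1]?.getD 0 < prices[j]?.getD 0
        · simp only [if_pos ha]
          exact ih _ _ _ f2 (by omega) (by omega)
        · simp only [if_neg ha]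
          exact ih _ _ _ f2 (by omega) (by omega)
    · cases f2 with
      | zero => cases f1 <;> rw [pvScan] <;> simp [hj, pvScan]
      | succ f2 => rw [pvScan, pvScan]; simp [hj]

lemma pvScanC_stop (prices a : List Int) (s j : Nat) (h : ¬ j < prices.length) :
    pvScanC prices a s j = a := by
  unfold pvScanC
  rw [(show prices.length - j = 0 by omega)]
  rfl

lemma pvScanC_asc (prices a : List Int) (s j : Nat) (h : j < prices.length)
    (ha : prices[j - 1]?.getD 0 < prices[j]?.getD 0) :
    pvScanC prices a s j
      = pvScanC prices
          ((a.set (pvPl prices s (prices[j - 1]?.getD 0) (j - 1)) (0:Int)).set j (1:Int))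
          (j + 1) (j + 2) := by
  unfold pvScanC
  rw [(show prices.length - j = (prices.length - j - 1) + 1 by omega), pvScan]
  simp only [if_pos h, if_pos ha]
  exact pvScan_fuel prices prices.length (prices.length - j - 1) _ _ _ _
    (by omega) (by omega)

lemma pvScanC_nonasc (prices a : List Int) (s j : Nat) (h : j < prices.length)
    (ha : ¬ prices[j - 1]?.getD 0 < prices[j]?.getD 0) :
    pvScanC prices a s j = pvScanC prices a s (j + 1) := by
  unfold pvScanC
  rw [(show prices.length - j = (prices.length - j - 1) + 1 by omega), pvScan]
  simp only [if_pos h, if_neg ha]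
  rw [(show prices.length - j - 1 = prices.length - (j + 1) by omega)]

-- equation lemmas for A's step
lemma pvStepA_none (prices : List Int) (a : List Int) (buy j : Nat) :
    pvStepA prices (a, (0:Int), (none : Option Int), buy) j
      = (a, 0, some (prices[j]?.getD 0), j) := by
  simp [pvStepA]

lemma pvStepA_lt (prices : List Int) (a : List Int) (v : Int) (buy j : Nat)
    (hlt : prices[j]?.getD 0 < v) :
    pvStepA prices (a, (0:Int), (some v : Option Int), buy) j
      = (a, 0, some (prices[j]?.getD 0), j) := by
  simp [pvStepA, hlt]

lemma pvStepA_gt (prices : List Int) (a : List Int) (v : Int) (buy j : Nat)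
    (hgt : v < prices[j]?.getD 0) :
    pvStepA prices (a, (0:Int), (some v : Option Int), buy) j
      = ((a.set buy (0:Int)).set j (1:Int), 0, none, 0) := by
  simp [pvStepA, hgt, (show ¬ prices[j]?.getD 0 < v by omega)]

lemma pvStepA_eqc (prices : List Int) (a : List Int) (v : Int) (buy j : Nat)
    (heq : prices[j]?.getD 0 = v) :
    pvStepA prices (a, (0:Int), (some v : Option Int), buy) j
      = (a, 0, some v, buy) := by
  simp [pvStepA, heq]

-- Main invariant, proved for A's fold started either mid-segment (the stretch scanned
-- so far is non-increasing, its minimum is the previous price, and the buy candidate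
-- is the start of the trailing plateau — exactly what pvPl computes) or at a fresh
-- segment start (min_price = inf).  Both forms by simultaneous induction on the fuel k.
lemma pvFold_eq (prices : List Int) :
    ∀ (k : Nat),
      (∀ (j s buy : Nat) (v : Int) (a : List Int),
        prices.length - j ≤ k → s + 1 ≤ j → v = prices[j - 1]?.getD 0 →
        pvPl prices s v (j - 1) = buy →
        ((List.range' j (prices.length - j)).foldl (pvStepA prices) (a, (0:Int), some v, buy)).1
          = pvScanC prices a s j)
      ∧ (∀ (i buy0 : Nat) (a : List Int),
        prices.length - i ≤ k →
        ((List.range' i (prices.length - i)).foldl (pvStepA prices)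
            (a, (0:Int), (none : Option Int), buy0)).1
          = pvScanC prices a i (i + 1)) := by
  intro k
  induction k with
  | zero =>
    constructor
    · intro j s buy v a hk _ _ _
      rw [pvScanC_stop _ _ _ _ (by omega : ¬ j < prices.length)]
      simp [(show prices.length - j = 0 by omega)]
    · intro i buy0 a hk
      rw [pvScanC_stop _ _ _ _ (by omega : ¬ i + 1 < prices.length)]
      simp [(show prices.length - i = 0 by omega)]
  | succ k ih =>
    constructor
    · intro j s buy v a hk hsj hv hbuy
      by_cases hj : j < prices.length
      · rw [(show prices.length - j = (prices.length - (j + 1)) + 1 by omega),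
          List.range'_succ, List.foldl_cons]
        rcases lt_trichotomy (prices[j]?.getD 0) v with hlt | heq | hgt
        · rw [pvStepA_lt _ _ _ _ _ hlt,
            pvScanC_nonasc _ _ _ _ hj (by rw [← hv]; omega)]
          refine ih.1 (j + 1) s j (prices[j]?.getD 0) a (by omega) (by omega)
            (by simp) ?_
          rw [(show j + 1 - 1 = j by omega)]
          exact pvPl_stop _ _ _ _ (fun hc => by rw [← hv] at hc; omega)
        · rw [pvStepA_eqc _ _ _ _ _ heq,
            pvScanC_nonasc _ _ _ _ hj (by rw [← hv]; omega)]
          refine ih.1 (j + 1) s buy v a (by omega) (by omega)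
            (by rw [(show j + 1 - 1 = j by omega)]; exact heq.symm) ?_
          rw [(show j + 1 - 1 = j by omega),
            pvPl_step _ _ _ _ (by omega) (by rw [← hv]), hbuy]
        · rw [pvStepA_gt _ _ _ _ _ hgt, pvScanC_asc _ _ _ _ hj (by rw [← hv]; omega),
            ← hv, hbuy]
          exact ih.2 (j + 1) 0 ((a.set buy (0:Int)).set j (1:Int)) (by omega)
      · rw [pvScanC_stop _ _ _ _ hj]
        simp [(show prices.length - j = 0 by omega)]
    · intro i buy0 a hk
      by_cases hi : i < prices.length
      · rw [(show prices.length - i = (prices.length - (i + 1)) + 1 by omega),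
          List.range'_succ, List.foldl_cons, pvStepA_none]
        refine ih.1 (i + 1) i i (prices[i]?.getD 0) a (by omega) (by omega)
          (by simp) ?_
        rw [(show i + 1 - 1 = i by omega)]
        exact pvPl_stop _ _ _ _ (by intro hc; omega)
      · rw [pvScanC_stop _ _ _ _ (by omega : ¬ i + 1 < prices.length)]
        simp [(show prices.length - i = 0 by omega)]

-- ===== VERDICT (by name: the statement is the Claim_ definition above) =====
theorem find_best_actions_spec : Claim_equal_find_best_actions := by
  intro prices _ _
  unfold Spec_find_best_actions find_best_actions find_best_actions_alt
  rw [List.range_eq_range']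
  have h := (pvFold_eq prices prices.length).2 0 0 (List.replicate 390 (2:Int)) (by omega)
  simp only [Nat.sub_zero] at h
  rw [h]
  unfold pvScanC
  exact pvScan_fuel prices prices.length (prices.length - (0 + 1))
    (List.replicate 390 (2:Int)) 0 (0 + 1) prices.length (by omega) (by omega)
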